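-- pv_equiv track=rewrite | github.com/KonstantinosAng/CodeWars | Python/[6 kyu] difference of 2.py | twos_difference
-- ===== SOURCE A (Python) =====
-- def twos_difference(lst):
--   if lst == []: return []
--   lst = [x for x in sorted(lst)]
--   rv = []
--   for i in range(len(lst)):
--     for j in range(len(lst)):
--       if lst[i] - lst[j] == 2:
--         rv.append((lst[j], lst[i]))
--   return rv
-- ===== SOURCE B (Python) =====
-- def twos_difference(lst):
--     s = sorted(lst)
--     count = {}
--     for x in s:
--         count[x] = count.get(x, 0) + 1
--     out = []
--     for x in s:
--         c = count.get(x - 2, 0)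
--         if c != 0:
--             out.extend([(x - 2, x)] * c)
--     return out
-- ===== Notes on version B (the rewrite author's own statement) =====
-- stated objective: faster
-- what changed: Replaced the O(n^2) nested index scan over the sorted list by a one-pass count dictionary plus a single lookup of x-2 per element (emitting count copies at once), preserving the exact emit order.
import Mathlib
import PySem

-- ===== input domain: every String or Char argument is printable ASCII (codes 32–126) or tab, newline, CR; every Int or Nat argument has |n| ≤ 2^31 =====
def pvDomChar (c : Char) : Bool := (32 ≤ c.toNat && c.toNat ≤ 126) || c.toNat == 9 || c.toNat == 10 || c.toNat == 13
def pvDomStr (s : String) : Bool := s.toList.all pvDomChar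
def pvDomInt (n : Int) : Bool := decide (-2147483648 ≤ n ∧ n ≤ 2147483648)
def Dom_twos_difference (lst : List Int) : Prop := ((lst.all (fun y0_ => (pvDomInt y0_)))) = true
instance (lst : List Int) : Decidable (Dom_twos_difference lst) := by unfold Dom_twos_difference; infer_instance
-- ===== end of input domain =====

-- B replaces A's quadratic nested scan by a counting dictionary with one lookup per element (faster, asymptotic).

-- ===== PORT A =====
def twos_difference (lst : List Int) : List (Int × Int) :=
  if lst = [] then []
  else
    (PySem.List.pyRange 0 (((PySem.List.sorted lst (fun x => x) false).map (fun x => x)).length : Int) 1).foldl (fun rv i =>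
      (PySem.List.pyRange 0 (((PySem.List.sorted lst (fun x => x) false).map (fun x => x)).length : Int) 1).foldl (fun rv j =>
        if PySem.List.pyGetD ((PySem.List.sorted lst (fun x => x) false).map (fun x => x)) i 0
             - PySem.List.pyGetD ((PySem.List.sorted lst (fun x => x) false).map (fun x => x)) j 0 = 2
        then rv ++ [(PySem.List.pyGetD ((PySem.List.sorted lst (fun x => x) false).map (fun x => x)) j 0,
                     PySem.List.pyGetD ((PySem.List.sorted lst (fun x => x) false).map (fun x => x)) i 0)]
        else rv) rv) []

-- ===== PORT B =====
def twos_difference_alt (lst : List Int) : List (Int × Int) :=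
  (PySem.List.sorted lst (fun x => x) false).foldl (fun out x =>
    if ((PySem.List.sorted lst (fun x => x) false).foldl
          (fun d y => d.modify y 0 (· + 1)) (PySem.Dict.empty : PySem.Dict Int Int)).getD (x - 2) 0 ≠ 0
    then out ++ PySem.List.pyRepeat [(x - 2, x)]
           (((PySem.List.sorted lst (fun x => x) false).foldl
               (fun d y => d.modify y 0 (· + 1)) (PySem.Dict.empty : PySem.Dict Int Int)).getD (x - 2) 0)
    else out) []

-- ===== PRECONDITION & SPEC =====
def Spec_twos_difference (lst : List Int) (out : List (Int × Int)) : Prop := out = twos_difference_alt lst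
instance (lst : List Int) (out : List (Int × Int)) : Decidable (Spec_twos_difference lst out) := by unfold Spec_twos_difference; infer_instance

-- ===== CLAIM (what is proved, stated in full; the proofs are below) =====
def Claim_equal_twos_difference : Prop := ∀ (lst : List Int), Dom_twos_difference lst → Spec_twos_difference lst (twos_difference lst)

-- ===== LEMMAS AND PROOFS =====

-- The per-element contribution is the same in both programs: all matches of x-2, paired with x.
lemma per_elem_eq (s : List Int) (x : Int) :
    (s.filter (fun y => decide (x - y = 2))).map (fun y => (y, x))
      = List.replicate (s.count (x - 2)) (x - 2, x) := by
  have hf : s.filter (fun y => decide (x - y = 2)) = s.filter (· == (x - 2)) := by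
    apply List.filter_congr
    intro y _
    have he : (x - y = 2) ↔ (y = x - 2) := by omega
    simp only [he]
    rfl
  rw [hf, List.filter_beq, List.map_replicate]

lemma twos_difference_eq_flatMap (lst : List Int) :
    twos_difference lst
      = (PySem.List.sorted lst (fun x => x) false).flatMap
          (fun x => List.replicate ((PySem.List.sorted lst (fun x => x) false).count (x - 2)) (x - 2, x)) := by
  by_cases h : lst = []
  · subst h; rfl
  · unfold twos_difference
    rw [if_neg h]
    simp only [List.map_id']
    set s := PySem.List.sorted lst (fun x => x) false with hs
    rw [PySem.List.foldl_pyRange_zero_pyGetD'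
      (f := fun rv x =>
        (PySem.List.pyRange 0 (s.length : Int) 1).foldl (fun rv j =>
          if x - PySem.List.pyGetD s j 0 = 2
          then rv ++ [(PySem.List.pyGetD s j 0, x)] else rv) rv)]
    have hinner : ∀ (rv : List (Int × Int)) (x : Int), x ∈ s →
        (PySem.List.pyRange 0 (s.length : Int) 1).foldl (fun rv j =>
          if x - PySem.List.pyGetD s j 0 = 2
          then rv ++ [(PySem.List.pyGetD s j 0, x)] else rv) rv
        = rv ++ List.replicate (s.count (x - 2)) (x - 2, x) := by
      intro rv x _
      rw [PySem.List.foldl_pyRange_zero_pyGetD'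
        (f := fun rv y => if x - y = 2 then rv ++ [(y, x)] else rv),
        PySem.List.foldl_append_ite (p := fun y => x - y = 2) (f := fun y => (y, x)),
        per_elem_eq]
    rw [PySem.List.foldl_congr_mem s _ (fun rv x => rv ++ List.replicate (s.count (x - 2)) (x - 2, x)) [] hinner,
      PySem.List.foldl_append_eq_flatMap]
    simp

lemma twos_difference_alt_eq_flatMap (lst : List Int) :
    twos_difference_alt lst
      = (PySem.List.sorted lst (fun x => x) false).flatMap
          (fun x => List.replicate ((PySem.List.sorted lst (fun x => x) false).count (x - 2)) (x - 2, x)) := by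
  unfold twos_difference_alt
  set s := PySem.List.sorted lst (fun x => x) false with hs
  have hbody : ∀ (out : List (Int × Int)), ∀ x ∈ s,
      (if (s.foldl (fun d y => d.modify y 0 (· + 1)) (PySem.Dict.empty : PySem.Dict Int Int)).getD (x - 2) 0 ≠ 0
       then out ++ PySem.List.pyRepeat [(x - 2, x)]
              ((s.foldl (fun d y => d.modify y 0 (· + 1)) (PySem.Dict.empty : PySem.Dict Int Int)).getD (x - 2) 0)
       else out)
      = out ++ List.replicate (s.count (x - 2)) (x - 2, x) := by
    intro out x _
    have hfd : (s.foldl (fun d y => d.modify y 0 (· + 1)) (PySem.Dict.empty : PySem.Dict Int Int)).getD (x - 2) 0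
        = (s.count (x - 2) : Int) := by
      rw [show s.foldl (fun d y => d.modify y 0 (· + 1)) (PySem.Dict.empty : PySem.Dict Int Int) = PySem.Dict.counter s from
        (PySem.Dict.counter_eq_foldl s).symm, PySem.Dict.getD_counter]
    simp only [hfd, PySem.List.pyRepeat_singleton, Int.toNat_natCast, ne_eq]
    by_cases hc : s.count (x - 2) = 0
    · simp [hc]
    · rw [if_pos (fun h => hc (by exact_mod_cast h))]
  rw [PySem.List.foldl_congr_mem s _ (fun out x => out ++ List.replicate (s.count (x - 2)) (x - 2, x)) [] hbody,
    PySem.List.foldl_append_eq_flatMap]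
  simp

-- ===== VERDICT (by name: the statement is the Claim_ definition above) =====
theorem twos_difference_spec : Claim_equal_twos_difference := by
  intro lst _
  unfold Spec_twos_difference
  rw [twos_difference_eq_flatMap, twos_difference_alt_eq_flatMap]
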